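-- pv_equiv track=rewrite | github.com/pgrabiec/CourierOrganizer | backend/algorithm/modifiers/sophisticated.py | get_point_remove
-- ===== SOURCE A (Python) =====
-- def get_point_remove(solution, index):
--     # look for the salesman with the random index point
--     count = 0  # number of points passed so far
--     last_count = 0  # number of points seen before the current salesman
--     salesman_to_modify = None
--     for salesman in solution:
--         last_count = count
--         count += len(salesman)
--         if count >= index + 1:
--             salesman_to_modify = salesman
--             break
--
--     if salesman_to_modify is None:
--         return
--
--     salesman_index = index - last_count - 1
--     value = salesman_to_modify[salesman_index]
--     del salesman_to_modify[salesman_index]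
--     return value
-- ===== SOURCE B (Python) =====
-- def get_point_remove(solution, index):
--     # Same salesman index convention as the original (including the -1 offset);
--     # mutates the chosen salesman in place just like the original.
--     cum = []
--     total = 0
--     for salesman in solution:
--         total += len(salesman)
--         cum.append(total)
--     lo, hi = 0, len(cum)
--     while lo < hi:
--         mid = (lo + hi) // 2
--         if cum[mid] > index:
--             hi = mid
--         else:
--             lo = mid + 1
--     if lo == len(cum):
--         return None
--     salesman = solution[lo]
--     before = cum[lo] - len(salesman)
--     salesman_index = index - before - 1
--     value = salesman[salesman_index]
--     del salesman[salesman_index]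
--     return value
-- ===== Notes on version B (the rewrite author's own statement) =====
-- stated objective: alternative
-- what changed: Replaces the linear scan carrying count/last_count accumulators by a prefix-sum table built once plus a hand-written binary search for the first cumulative total exceeding index; the equivalence is about the return value (both versions also perform the identical in-place deletion).
import Mathlib
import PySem

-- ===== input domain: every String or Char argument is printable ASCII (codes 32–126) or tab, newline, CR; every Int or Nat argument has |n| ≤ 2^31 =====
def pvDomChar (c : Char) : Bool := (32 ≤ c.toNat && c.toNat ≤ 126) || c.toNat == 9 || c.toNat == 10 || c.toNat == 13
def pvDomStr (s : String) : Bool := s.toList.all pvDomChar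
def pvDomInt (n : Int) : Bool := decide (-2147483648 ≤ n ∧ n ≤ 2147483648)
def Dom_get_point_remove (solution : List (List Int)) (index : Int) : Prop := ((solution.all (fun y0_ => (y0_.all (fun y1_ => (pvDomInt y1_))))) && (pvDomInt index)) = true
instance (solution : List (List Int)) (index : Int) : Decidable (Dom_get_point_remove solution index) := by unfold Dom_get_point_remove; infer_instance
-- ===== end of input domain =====

-- B replaces A's linear scan by a prefix-sum table plus a binary search (alternative algorithm);
-- both Pythons also delete the found element in place: the equivalence proved is about the return value.

-- ===== PORT A =====
-- the for-loop searching for the salesman: returns (salesman, last_count) at the first break, none if no break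
def findA (solution : List (List Int)) (index : Int) (count : Int) : Option (List Int × Int) :=
  match solution with
  | [] => none
  | s :: rest =>
    let last_count := count
    let count' := count + (s.length : Int)
    if count' ≥ index + 1 then some (s, last_count) else findA rest index count'

def get_point_remove (solution : List (List Int)) (index : Int) : Option Int :=
  match findA solution index 0 with
  | none => none
  | some (salesman_to_modify, last_count) =>
    -- value = salesman_to_modify[salesman_index]; IndexError (= none) is excluded by Pre_
    PySem.List.pyGet? salesman_to_modify (index - last_count - 1)

-- ===== PORT B =====
-- the first loop of Source B: list of cumulative totals
def cumB (solution : List (List Int)) (total : Int) : List Int :=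
  match solution with
  | [] => []
  | s :: rest => (total + (s.length : Int)) :: cumB rest (total + (s.length : Int))

-- the while-loop of Source B (binary search); cum[mid] is always in range when read, so getD is exact
def bsB (cum : List Int) (index : Int) (lo hi : Nat) : Nat :=
  if _h : lo < hi then
    let mid := (lo + hi) / 2
    if index < cum.getD mid 0 then bsB cum index lo mid
    else bsB cum index (mid + 1) hi
  else lo
termination_by hi - lo
decreasing_by all_goals omega

def get_point_remove_alt (solution : List (List Int)) (index : Int) : Option Int :=
  let cum := cumB solution 0
  let lo := bsB cum index 0 cum.length
  if lo = cum.length then none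
  else
    let salesman := solution.getD lo []   -- lo < len(solution) here, so getD is exact
    let before := cum.getD lo 0 - (salesman.length : Int)
    PySem.List.pyGet? salesman (index - before - 1)

-- ===== PRECONDITION & SPEC =====
-- Pre_ excludes exactly the inputs on which Python A raises IndexError (a negative index too far
-- below the length of the first salesman); Python B raises the same IndexError there.
def Pre_get_point_remove (solution : List (List Int)) (index : Int) : Prop :=
  0 ≤ index ∨ solution = [] ∨ 1 - (((solution.headD []).length : Int)) ≤ index
instance (solution : List (List Int)) (index : Int) : Decidable (Pre_get_point_remove solution index) := by unfold Pre_get_point_remove; infer_instance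
def pvWitness_get_point_remove : List (List Int) × Int := ([[1, 2], [3]], 2)

def Spec_get_point_remove (solution : List (List Int)) (index : Int) (out : Option Int) : Prop := out = get_point_remove_alt solution index
instance (solution : List (List Int)) (index : Int) (out : Option Int) : Decidable (Spec_get_point_remove solution index out) := by unfold Spec_get_point_remove; infer_instance

-- ===== CLAIM (what is proved, stated in full; the proofs are below) =====
def Claim_equal_get_point_remove : Prop := ∀ (solution : List (List Int)) (index : Int), Dom_get_point_remove solution index → Pre_get_point_remove solution index → Spec_get_point_remove solution index (get_point_remove solution index)

-- ===== LEMMAS AND PROOFS =====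

theorem cumB_length (solution : List (List Int)) (t : Int) : (cumB solution t).length = solution.length := by
  induction solution generalizing t with
  | nil => rfl
  | cons s rest ih => simp [cumB, ih]

theorem cumB_lb (solution : List (List Int)) (t : Int) (j : Nat) (hj : j < (cumB solution t).length) :
    t ≤ (cumB solution t).getD j 0 := by
  induction solution generalizing t j with
  | nil => simp [cumB] at hj
  | cons s rest ih =>
    cases j with
    | zero => simp only [cumB, List.getD_cons_zero]; omega
    | succ j' =>
      simp only [cumB, List.length_cons, Nat.succ_lt_succ_iff] at hj
      simp only [cumB, List.getD_cons_succ]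
      have h1 := ih (t + (s.length : Int)) j' hj
      have hs : (0:Int) ≤ (s.length : Int) := by positivity
      omega

theorem cumB_mono (solution : List (List Int)) (t : Int) (i j : Nat) (hij : i ≤ j)
    (hj : j < (cumB solution t).length) :
    (cumB solution t).getD i 0 ≤ (cumB solution t).getD j 0 := by
  induction solution generalizing t i j with
  | nil => simp [cumB] at hj
  | cons s rest ih =>
    cases i with
    | zero =>
      cases j with
      | zero => exact le_refl _
      | succ j' =>
        simp only [cumB, List.length_cons, Nat.succ_lt_succ_iff] at hj
        simp only [cumB, List.getD_cons_zero, List.getD_cons_succ]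
        exact cumB_lb rest (t + (s.length : Int)) j' hj
    | succ i' =>
      cases j with
      | zero => omega
      | succ j' =>
        simp only [cumB, List.length_cons, Nat.succ_lt_succ_iff] at hj
        simp only [cumB, List.getD_cons_succ]
        exact ih (t + (s.length : Int)) i' j' (by omega) hj

theorem bsB_inv (cum : List Int) (index : Int)
    (mono : ∀ i j : Nat, i ≤ j → j < cum.length → cum.getD i 0 ≤ cum.getD j 0) :
    ∀ (n lo hi : Nat), hi - lo ≤ n → lo ≤ hi → hi ≤ cum.length →
    (∀ j, j < lo → cum.getD j 0 ≤ index) → (hi = cum.length ∨ index < cum.getD hi 0) →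
    bsB cum index lo hi ≤ cum.length ∧
    (∀ j, j < bsB cum index lo hi → cum.getD j 0 ≤ index) ∧
    (bsB cum index lo hi = cum.length ∨ index < cum.getD (bsB cum index lo hi) 0) := by
  intro n
  induction n with
  | zero =>
    intro lo hi hfuel hle hhi hlow hhigh
    have heq : lo = hi := by omega
    subst heq
    rw [bsB]
    simp only [lt_irrefl, dite_false]
    exact ⟨hhi, hlow, hhigh⟩
  | succ n ih =>
    intro lo hi hfuel hle hhi hlow hhigh
    rw [bsB]
    by_cases h : lo < hi
    · simp only [h, dite_true]
      by_cases hc : index < cum.getD ((lo + hi) / 2) 0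
      · simp only [hc, if_true]
        exact ih lo ((lo + hi) / 2) (by omega) (by omega) (by omega) hlow (Or.inr hc)
      · simp only [hc, if_false]
        refine ih ((lo + hi) / 2 + 1) hi (by omega) (by omega) hhi ?_ hhigh
        intro j hj
        have := mono j ((lo + hi) / 2) (by omega) (by omega)
        omega
    · simp only [h, dite_false]
      have heq : lo = hi := by omega
      subst heq
      exact ⟨hhi, hlow, hhigh⟩

theorem findA_eq (solution : List (List Int)) :
    ∀ (c index : Int) (k : Nat), k ≤ solution.length →
    (∀ j, j < k → (cumB solution c).getD j 0 ≤ index) →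
    (k = solution.length ∨ index < (cumB solution c).getD k 0) →
    findA solution index c =
      if k = solution.length then none
      else some (solution.getD k [],
        (cumB solution c).getD k 0 - ((solution.getD k []).length : Int)) := by
  induction solution with
  | nil =>
    intro c index k hk _ _
    have : k = 0 := by simp at hk; omega
    subst this
    simp [findA]
  | cons s rest ih =>
    intro c index k hk hlow hhigh
    by_cases hb : c + (s.length : Int) ≥ index + 1
    · -- the loop breaks on the first salesman
      have hk0 : k = 0 := by
        by_contra hne
        have h0 : (cumB (s :: rest) c).getD 0 0 ≤ index := hlow 0 (by omega)
        simp only [cumB, List.getD_cons_zero] at h0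
        omega
      subst hk0
      simp [findA, hb, cumB]
    · have hk0 : k ≠ 0 := by
        intro h0
        subst h0
        rcases hhigh with h | h
        · simp at h
        · simp only [cumB, List.getD_cons_zero] at h; omega
      obtain ⟨k', rfl⟩ : ∃ k', k = k' + 1 := ⟨k - 1, by omega⟩
      have hrec := ih (c + (s.length : Int)) index k'
        (by simpa using hk)
        (fun j hj => by
          have := hlow (j + 1) (by omega)
          simpa [cumB] using this)
        (by
          rcases hhigh with h | h
          · left; simpa using h
          · right; simpa [cumB] using h)
      simp only [findA, if_neg hb]
      rw [hrec]
      simp [cumB]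

-- ===== VERDICT (by name: the statement is the Claim_ definition above) =====
theorem get_point_remove_spec : Claim_equal_get_point_remove := by
  intro solution index _hdom _hpre
  unfold Spec_get_point_remove get_point_remove get_point_remove_alt
  dsimp only
  have mono := fun i j hij hj => cumB_mono solution 0 i j hij hj
  have hlen := cumB_length solution 0
  obtain ⟨hkle, hklow, hkhigh⟩ :=
    bsB_inv (cumB solution 0) index mono (cumB solution 0).length 0 (cumB solution 0).length
      (by omega) (by omega) (le_refl _) (by intro j hj; omega) (Or.inl rfl)
  have hfind := findA_eq solution 0 index (bsB (cumB solution 0) index 0 (cumB solution 0).length)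
    (by omega) hklow
    (by rcases hkhigh with h | h
        · left; omega
        · right; exact h)
  rw [hfind]
  by_cases hkn : bsB (cumB solution 0) index 0 (cumB solution 0).length = (cumB solution 0).length
  · rw [if_pos (by omega), if_pos hkn]
  · rw [if_neg (by omega), if_neg hkn]
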